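-- pv_equiv track=rewrite | github.com/723poil/coding-test-study | week6/1. 상어 초등학교/상어_초등학교_김현지.py | calculateSatisfaction
-- ===== SOURCE A (Python) =====
-- def calculateSatisfaction(N, seats, favorites):
--     dr = [-1, 1, 0, 0]
--     dc = [0, 0, -1, 1]
--     totalSatisfaction = 0
--     for r in range(N):
--         for c in range(N):
--             likeStudentCnt = 0
--             for i in range(4):
--                 nr = r + dr[i]
--                 nc = c + dc[i]
--                 if not (0 <= nr < N and 0 <= nc < N):
--                     continue
--                 if seats[nr][nc] in favorites[seats[r][c]]:
--                     likeStudentCnt += 1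
--             if likeStudentCnt == 4:
--                 totalSatisfaction += 1000
--             elif likeStudentCnt == 3:
--                 totalSatisfaction += 100
--             elif likeStudentCnt == 2:
--                 totalSatisfaction += 10
--             elif likeStudentCnt == 1:
--                 totalSatisfaction += 1
--     return totalSatisfaction
--
--
--
--     pass
-- ===== SOURCE B (Python) =====
-- def edgeHits(N, seats, favorites, r, c):
--     # cells that gain one satisfied-neighbour from the right/down edges at (r, c)
--     seg = []
--     if c + 1 < N:
--         a, b = seats[r][c], seats[r][c + 1]
--         if b in favorites[a]:
--             seg.append((r, c))
--         if a in favorites[b]: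
--             seg.append((r, c + 1))
--     if r + 1 < N:
--         a, b = seats[r][c], seats[r + 1][c]
--         if b in favorites[a]:
--             seg.append((r, c))
--         if a in favorites[b]:
--             seg.append((r + 1, c))
--     return seg
--
--
-- def calculateSatisfaction(N, seats, favorites):
--     hits = []
--     for r in range(N):
--         for c in range(N):
--             hits += edgeHits(N, seats, favorites, r, c)
--     counts = {}
--     for t in hits:
--         counts[t] = counts.get(t, 0) + 1
--     total = 0
--     for r in range(N):
--         for c in range(N):
--             k = counts.get((r, c), 0)
--             total += 0 if k == 0 else 10 ** (k - 1)
--     return total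
-- ===== Notes on version B (the rewrite author's own statement) =====
-- stated objective: alternative
-- what changed: B replaces A's per-cell 4-direction scan with an edge pass: one sweep over right/down adjacencies records each satisfied-neighbour event in a dict counter keyed by cell, then a scoring pass uses the closed form 10**(k-1) instead of the if/elif chain.
import Mathlib
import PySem

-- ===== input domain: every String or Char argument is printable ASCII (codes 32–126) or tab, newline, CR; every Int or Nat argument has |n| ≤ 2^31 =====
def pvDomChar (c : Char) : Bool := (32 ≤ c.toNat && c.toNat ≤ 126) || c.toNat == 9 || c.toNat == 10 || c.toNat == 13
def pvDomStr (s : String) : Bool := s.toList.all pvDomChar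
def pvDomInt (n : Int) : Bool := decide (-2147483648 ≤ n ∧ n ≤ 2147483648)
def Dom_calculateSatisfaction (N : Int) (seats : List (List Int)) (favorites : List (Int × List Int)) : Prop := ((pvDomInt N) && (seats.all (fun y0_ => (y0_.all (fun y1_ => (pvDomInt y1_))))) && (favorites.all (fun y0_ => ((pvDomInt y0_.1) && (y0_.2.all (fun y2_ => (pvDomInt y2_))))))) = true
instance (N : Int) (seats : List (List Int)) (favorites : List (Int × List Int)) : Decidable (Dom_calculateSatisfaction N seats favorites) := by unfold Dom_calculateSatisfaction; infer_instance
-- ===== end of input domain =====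

-- B replaces A's per-cell 4-direction scan with a single sweep over right/down edges feeding a
-- dict counter of satisfied-neighbour events, scored in a second pass by the closed form 10^(k-1):
-- a different decomposition of the same O(N^2) work.

-- ===== PORT A =====
def calculateSatisfaction (N : Int) (seats : List (List Int)) (favorites : List (Int × List Int)) : Int :=
  let dr : List Int := [-1, 1, 0, 0]
  let dc : List Int := [0, 0, -1, 1]
  (PySem.List.pyRange 0 N 1).foldl (fun tot r =>
    (PySem.List.pyRange 0 N 1).foldl (fun tot c =>
      let cnt : Int := (PySem.List.pyRange 0 4 1).foldl (fun k i =>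
        let nr := r + PySem.List.pyGetD dr i 0
        let nc := c + PySem.List.pyGetD dc i 0
        if ¬ (0 ≤ nr ∧ nr < N ∧ 0 ≤ nc ∧ nc < N) then k
        else if (PySem.Dict.getD (PySem.Dict.ofList favorites) (PySem.List.pyGetD (PySem.List.pyGetD seats r []) c 0) []).contains
                  (PySem.List.pyGetD (PySem.List.pyGetD seats nr []) nc 0) then k + 1 else k) 0
      if cnt = 4 then tot + 1000
      else if cnt = 3 then tot + 100
      else if cnt = 2 then tot + 10
      else if cnt = 1 then tot + 1
      else tot) tot) 0

-- ===== PORT B =====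
-- helper edgeHits of Source B: cells gaining one satisfied-neighbour from the right/down edges at (r, c)
def edgeHits (N : Int) (seats : List (List Int)) (favorites : List (Int × List Int)) (r c : Int) : List (Int × Int) :=
  (if c + 1 < N then
    let a := PySem.List.pyGetD (PySem.List.pyGetD seats r []) c 0
    let b := PySem.List.pyGetD (PySem.List.pyGetD seats r []) (c + 1) 0
    (if (PySem.Dict.getD (PySem.Dict.ofList favorites) a []).contains b then [(r, c)] else []) ++
    (if (PySem.Dict.getD (PySem.Dict.ofList favorites) b []).contains a then [(r, c + 1)] else [])
  else []) ++
  (if r + 1 < N then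
    let a := PySem.List.pyGetD (PySem.List.pyGetD seats r []) c 0
    let b := PySem.List.pyGetD (PySem.List.pyGetD seats (r + 1) []) c 0
    (if (PySem.Dict.getD (PySem.Dict.ofList favorites) a []).contains b then [(r, c)] else []) ++
    (if (PySem.Dict.getD (PySem.Dict.ofList favorites) b []).contains a then [(r + 1, c)] else [])
  else [])

def calculateSatisfaction_alt (N : Int) (seats : List (List Int)) (favorites : List (Int × List Int)) : Int :=
  let hits : List (Int × Int) :=
    (PySem.List.pyRange 0 N 1).foldl (fun acc r =>
      (PySem.List.pyRange 0 N 1).foldl (fun acc c => acc ++ edgeHits N seats favorites r c) acc) []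
  let counts : PySem.Dict (Int × Int) Int :=
    hits.foldl (fun d t => PySem.Dict.insert d t (PySem.Dict.getD d t 0 + 1)) PySem.Dict.empty
  (PySem.List.pyRange 0 N 1).foldl (fun tot r =>
    (PySem.List.pyRange 0 N 1).foldl (fun tot c =>
      let k : Int := PySem.Dict.getD counts (r, c) 0
      tot + (if k = 0 then 0 else 10 ^ (k - 1).toNat)) tot) 0

-- ===== PRECONDITION & SPEC =====
-- Pre_ excludes exactly the inputs on which the Python A raises (IndexError: fewer than N rows
-- or a row shorter than N among the first N; KeyError: a seat value in the N×N block that is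
-- not a key of favorites); for N = 1 the cell has no in-bounds neighbour, nothing is indexed
-- and A always returns, so N = 1 is admitted unconditionally.
def Pre_calculateSatisfaction (N : Int) (seats : List (List Int)) (favorites : List (Int × List Int)) : Prop :=
  N = 1 ∨
  N.toNat ≤ seats.length ∧
  ∀ row ∈ seats.take N.toNat, N.toNat ≤ row.length ∧
    ∀ v ∈ row.take N.toNat, PySem.Dict.contains (PySem.Dict.ofList favorites) v = true
instance (N : Int) (seats : List (List Int)) (favorites : List (Int × List Int)) : Decidable (Pre_calculateSatisfaction N seats favorites) := by unfold Pre_calculateSatisfaction; infer_instance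

def pvWitness_calculateSatisfaction : Int × List (List Int) × (List (Int × List Int)) :=
  (2, [[0, 1], [1, 0]], [(0, [1]), (1, [])])

def Spec_calculateSatisfaction (N : Int) (seats : List (List Int)) (favorites : List (Int × List Int)) (out : Int) : Prop := out = calculateSatisfaction_alt N seats favorites
instance (N : Int) (seats : List (List Int)) (favorites : List (Int × List Int)) (out : Int) : Decidable (Spec_calculateSatisfaction N seats favorites out) := by unfold Spec_calculateSatisfaction; infer_instance

-- ===== CLAIM (what is proved, stated in full; the proofs are below) =====
def Claim_equal_calculateSatisfaction : Prop := ∀ (N : Int) (seats : List (List Int)) (favorites : List (Int × List Int)), Dom_calculateSatisfaction N seats favorites → Pre_calculateSatisfaction N seats favorites → Spec_calculateSatisfaction N seats favorites (calculateSatisfaction N seats favorites)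

-- ===== LEMMAS AND PROOFS =====

-- seat value / like relation, total forms shared by the reasoning below
def pvG (seats : List (List Int)) (r c : Int) : Int :=
  PySem.List.pyGetD (PySem.List.pyGetD seats r []) c 0
def pvLk (favorites : List (Int × List Int)) (a b : Int) : Bool :=
  (PySem.Dict.getD (PySem.Dict.ofList favorites) a []).contains b

-- A's per-cell count, written as the four direction indicators in loop order (up, down, left, right)
def cellCnt (N : Int) (seats : List (List Int)) (favorites : List (Int × List Int)) (r c : Int) : Int :=
  (if 0 ≤ r - 1 ∧ r - 1 < N ∧ 0 ≤ c ∧ c < N ∧ pvLk favorites (pvG seats r c) (pvG seats (r - 1) c) = true then 1 else 0)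
  + (if 0 ≤ r + 1 ∧ r + 1 < N ∧ 0 ≤ c ∧ c < N ∧ pvLk favorites (pvG seats r c) (pvG seats (r + 1) c) = true then 1 else 0)
  + (if 0 ≤ r ∧ r < N ∧ 0 ≤ c - 1 ∧ c - 1 < N ∧ pvLk favorites (pvG seats r c) (pvG seats r (c - 1)) = true then 1 else 0)
  + (if 0 ≤ r ∧ r < N ∧ 0 ≤ c + 1 ∧ c + 1 < N ∧ pvLk favorites (pvG seats r c) (pvG seats r (c + 1)) = true then 1 else 0)

def scoreA (k : Int) : Int :=
  if k = 4 then 1000 else if k = 3 then 100 else if k = 2 then 10 else if k = 1 then 1 else 0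


-- step of A's direction loop as "accumulator + indicator"
lemma stepEq (k : Int) (P : Prop) [Decidable P] (m : Bool) :
    (if ¬ P then k else if m = true then k + 1 else k) = k + (if P ∧ m = true then 1 else 0) := by
  by_cases hP : P <;> cases m <;> simp [hP]

-- a doubly nested "tot += f r c" loop is a double sum
lemma foldl2_eq_sum (l : List Int) (g : Int → Int → Int → Int) (f : Int → Int → Int)
    (h : ∀ tot r c, g tot r c = tot + f r c) :
    l.foldl (fun tot r => l.foldl (fun tot c => g tot r c) tot) 0
      = (l.map (fun r => (l.map (fun c => f r c)).sum)).sum := by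
  have hin : ∀ (acc r : Int), l.foldl (fun tot c => g tot r c) acc = acc + (l.map (fun c => f r c)).sum := by
    intro acc r
    have hg : (fun (tot c : Int) => g tot r c) = fun tot c => tot + f r c :=
      funext fun t => funext fun c => h t r c
    rw [hg, PySem.List.foldl_add]
  rw [PySem.List.foldl_congr_mem l _ (fun tot r => tot + (l.map (fun c => f r c)).sum) 0 (fun acc x _ => hin acc x), PySem.List.foldl_add]
  simp

lemma cnt_eq (N : Int) (seats : List (List Int)) (favorites : List (Int × List Int)) (r c : Int) :
    (PySem.List.pyRange 0 4 1).foldl (fun k i =>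
        let nr := r + PySem.List.pyGetD ([-1, 1, 0, 0] : List Int) i 0
        let nc := c + PySem.List.pyGetD ([0, 0, -1, 1] : List Int) i 0
        if ¬ (0 ≤ nr ∧ nr < N ∧ 0 ≤ nc ∧ nc < N) then k
        else if (PySem.Dict.getD (PySem.Dict.ofList favorites) (PySem.List.pyGetD (PySem.List.pyGetD seats r []) c 0) []).contains
                  (PySem.List.pyGetD (PySem.List.pyGetD seats nr []) nc 0) then k + 1 else k) 0
      = cellCnt N seats favorites r c := by
  have hcong : ∀ (acc x : Int), x ∈ PySem.List.pyRange 0 4 1 →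
      (fun (k i : Int) =>
        let nr := r + PySem.List.pyGetD ([-1, 1, 0, 0] : List Int) i 0
        let nc := c + PySem.List.pyGetD ([0, 0, -1, 1] : List Int) i 0
        if ¬ (0 ≤ nr ∧ nr < N ∧ 0 ≤ nc ∧ nc < N) then k
        else if (PySem.Dict.getD (PySem.Dict.ofList favorites) (PySem.List.pyGetD (PySem.List.pyGetD seats r []) c 0) []).contains
                  (PySem.List.pyGetD (PySem.List.pyGetD seats nr []) nc 0) then k + 1 else k) acc x
      = acc + (fun (i : Int) =>
          if (0 ≤ r + PySem.List.pyGetD ([-1, 1, 0, 0] : List Int) i 0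
              ∧ r + PySem.List.pyGetD ([-1, 1, 0, 0] : List Int) i 0 < N
              ∧ 0 ≤ c + PySem.List.pyGetD ([0, 0, -1, 1] : List Int) i 0
              ∧ c + PySem.List.pyGetD ([0, 0, -1, 1] : List Int) i 0 < N)
            ∧ (PySem.Dict.getD (PySem.Dict.ofList favorites) (PySem.List.pyGetD (PySem.List.pyGetD seats r []) c 0) []).contains
                (PySem.List.pyGetD (PySem.List.pyGetD seats (r + PySem.List.pyGetD ([-1, 1, 0, 0] : List Int) i 0) [])
                  (c + PySem.List.pyGetD ([0, 0, -1, 1] : List Int) i 0) 0) = true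
          then 1 else 0) x := by
    intro acc x _
    exact stepEq acc _ _
  rw [PySem.List.foldl_congr_mem (PySem.List.pyRange 0 4 1) _ _ 0 hcong, PySem.List.foldl_add]
  rw [show PySem.List.pyRange 0 4 1 = [0, 1, 2, 3] from by decide]
  simp only [List.map_cons, List.map_nil, List.sum_cons, List.sum_nil,
    show PySem.List.pyGetD ([-1, 1, 0, 0] : List Int) (0 : Int) 0 = -1 from by decide,
    show PySem.List.pyGetD ([-1, 1, 0, 0] : List Int) (1 : Int) 0 = 1 from by decide,
    show PySem.List.pyGetD ([-1, 1, 0, 0] : List Int) (2 : Int) 0 = 0 from by decide,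
    show PySem.List.pyGetD ([-1, 1, 0, 0] : List Int) (3 : Int) 0 = 0 from by decide,
    show PySem.List.pyGetD ([0, 0, -1, 1] : List Int) (0 : Int) 0 = 0 from by decide,
    show PySem.List.pyGetD ([0, 0, -1, 1] : List Int) (1 : Int) 0 = 0 from by decide,
    show PySem.List.pyGetD ([0, 0, -1, 1] : List Int) (2 : Int) 0 = -1 from by decide,
    show PySem.List.pyGetD ([0, 0, -1, 1] : List Int) (3 : Int) 0 = 1 from by decide]
  simp only [cellCnt, pvG, pvLk, add_zero, zero_add, sub_eq_add_neg, and_assoc]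
  ring_nf

lemma A_eq_sum (N : Int) (seats : List (List Int)) (favorites : List (Int × List Int)) :
    calculateSatisfaction N seats favorites
      = ((PySem.List.pyRange 0 N 1).map (fun r =>
          ((PySem.List.pyRange 0 N 1).map (fun c => scoreA (cellCnt N seats favorites r c))).sum)).sum := by
  have hbody : ∀ (tot r c : Int),
      (let cnt : Int := (PySem.List.pyRange 0 4 1).foldl (fun k i =>
          let nr := r + PySem.List.pyGetD ([-1, 1, 0, 0] : List Int) i 0
          let nc := c + PySem.List.pyGetD ([0, 0, -1, 1] : List Int) i 0
          if ¬ (0 ≤ nr ∧ nr < N ∧ 0 ≤ nc ∧ nc < N) then k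
          else if (PySem.Dict.getD (PySem.Dict.ofList favorites) (PySem.List.pyGetD (PySem.List.pyGetD seats r []) c 0) []).contains
                    (PySem.List.pyGetD (PySem.List.pyGetD seats nr []) nc 0) then k + 1 else k) 0
        if cnt = 4 then tot + 1000
        else if cnt = 3 then tot + 100
        else if cnt = 2 then tot + 10
        else if cnt = 1 then tot + 1
        else tot)
      = tot + scoreA (cellCnt N seats favorites r c) := by
    intro tot r c
    rw [cnt_eq N seats favorites r c]
    simp only [scoreA]
    split_ifs <;> omega
  exact foldl2_eq_sum (PySem.List.pyRange 0 N 1) _ _ hbody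

-- sum over a Nodup list of a function supported at one point
lemma single_sum (l : List Int) (hl : l.Nodup) (q : Int) (h : Int → Int) :
    (l.map (fun x => if x = q then h x else 0)).sum = if q ∈ l then h q else 0 := by
  induction l with
  | nil => simp
  | cons a t ih =>
    rcases List.nodup_cons.mp hl with ⟨ha, ht⟩
    by_cases haq : a = q
    · subst haq
      simp [ih ht, ha]
    · have hqa : ¬ q = a := fun hh => haq hh.symm
      simp [haq, hqa, ih ht]

-- double sum over a Nodup grid of a function supported at one point
lemma pt_sum (l : List Int) (hl : l.Nodup) (p q : Int) (f : Int → Int → Int) :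
    (l.map (fun r' => (l.map (fun c' => if r' = p ∧ c' = q then f r' c' else 0)).sum)).sum
      = if p ∈ l ∧ q ∈ l then f p q else 0 := by
  have inner : ∀ r', (l.map (fun c' => if r' = p ∧ c' = q then f r' c' else 0)).sum
      = if r' = p then (if q ∈ l then f r' q else 0) else 0 := by
    intro r'
    by_cases hr : r' = p
    · have he : (fun c' => if r' = p ∧ c' = q then f r' c' else 0)
          = (fun c' => if c' = q then f r' c' else 0) := funext fun c' => by simp [hr]
      rw [he, single_sum l hl q (f r')]
      simp [hr]
    · simp [hr]
  rw [show (fun r' => (l.map (fun c' => if r' = p ∧ c' = q then f r' c' else 0)).sum)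
      = (fun r' => if r' = p then (if q ∈ l then f r' q else 0) else 0) from funext inner,
    single_sum l hl p _]
  by_cases hq : q ∈ l <;> by_cases hp : p ∈ l <;> simp [hp, hq]

lemma count_flatMap_int (l : List Int) (f : Int → List (Int × Int)) (x : Int × Int) :
    (((l.flatMap f).count x : Nat) : Int) = (l.map (fun i => (((f i).count x : Nat) : Int))).sum := by
  induction l with
  | nil => simp
  | cons a t ih => simp [List.flatMap_cons, List.count_append, ih]

set_option maxHeartbeats 2000000 in
-- count of a target in one edge segment, as three point-indicators over (r', c')
lemma count_edgeHits (N : Int) (seats : List (List Int)) (favorites : List (Int × List Int))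
    (r c r' c' : Int) :
    (((edgeHits N seats favorites r' c').count (r, c) : Nat) : Int)
      = (if r' = r ∧ c' = c then
            (if c' + 1 < N ∧ pvLk favorites (pvG seats r' c') (pvG seats r' (c' + 1)) = true then 1 else 0)
          + (if r' + 1 < N ∧ pvLk favorites (pvG seats r' c') (pvG seats (r' + 1) c') = true then 1 else 0)
         else 0)
      + (if r' = r ∧ c' = c - 1 then
            (if c' + 1 < N ∧ pvLk favorites (pvG seats r' (c' + 1)) (pvG seats r' c') = true then 1 else 0)
         else 0)
      + (if r' = r - 1 ∧ c' = c then
            (if r' + 1 < N ∧ pvLk favorites (pvG seats (r' + 1) c') (pvG seats r' c') = true then 1 else 0)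
         else 0) := by
  have he : edgeHits N seats favorites r' c'
      = (if c' + 1 < N then
          (if pvLk favorites (pvG seats r' c') (pvG seats r' (c' + 1)) = true then [(r', c')] else []) ++
          (if pvLk favorites (pvG seats r' (c' + 1)) (pvG seats r' c') = true then [(r', c' + 1)] else [])
        else []) ++
        (if r' + 1 < N then
          (if pvLk favorites (pvG seats r' c') (pvG seats (r' + 1) c') = true then [(r', c')] else []) ++
          (if pvLk favorites (pvG seats (r' + 1) c') (pvG seats r' c') = true then [(r' + 1, c')] else [])
        else []) := rfl
  rw [he]
  clear he
  by_cases h1 : c' + 1 < N <;> by_cases h2 : r' + 1 < N <;>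
    by_cases m1 : pvLk favorites (pvG seats r' c') (pvG seats r' (c' + 1)) = true <;>
    by_cases m2 : pvLk favorites (pvG seats r' (c' + 1)) (pvG seats r' c') = true <;>
    by_cases m3 : pvLk favorites (pvG seats r' c') (pvG seats (r' + 1) c') = true <;>
    by_cases m4 : pvLk favorites (pvG seats (r' + 1) c') (pvG seats r' c') = true <;>
    simp only [h1, h2, m1, m2, m3, m4, if_true, if_false, List.count_append, List.nil_append,
      List.append_nil, List.count_nil, List.count_cons, beq_iff_eq,
      Prod.mk.injEq] <;>
    push_cast <;>
    split_ifs <;> first | omega | simp_all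

lemma cellCnt_bounds (N : Int) (seats : List (List Int)) (favorites : List (Int × List Int))
    (r c : Int) : 0 ≤ cellCnt N seats favorites r c ∧ cellCnt N seats favorites r c ≤ 4 := by
  unfold cellCnt
  split_ifs <;> omega

lemma score_eq (k : Int) (h0 : 0 ≤ k) (h4 : k ≤ 4) :
    (if k = 0 then 0 else (10 : Int) ^ (k - 1).toNat) = scoreA k := by
  interval_cases k <;> norm_num [scoreA] <;> decide

set_option maxHeartbeats 4000000 in
-- the edge pass counts exactly A's per-cell neighbour count
lemma count_hits_eq (N : Int) (seats : List (List Int)) (favorites : List (Int × List Int))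
    (r c : Int) (hr0 : 0 ≤ r) (hrN : r < N) (hc0 : 0 ≤ c) (hcN : c < N) :
    ((((PySem.List.pyRange 0 N 1).flatMap (fun r' =>
        (PySem.List.pyRange 0 N 1).flatMap (fun c' => edgeHits N seats favorites r' c'))).count (r, c) : Nat) : Int)
      = cellCnt N seats favorites r c := by
  rw [count_flatMap_int]
  have hin : (fun r' : Int => ((((PySem.List.pyRange 0 N 1).flatMap
        (fun c' => edgeHits N seats favorites r' c')).count (r, c) : Nat) : Int))
      = fun r' : Int =>
        ((PySem.List.pyRange 0 N 1).map (fun c' => if r' = r ∧ c' = c then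
            (if c' + 1 < N ∧ pvLk favorites (pvG seats r' c') (pvG seats r' (c' + 1)) = true then 1 else 0)
          + (if r' + 1 < N ∧ pvLk favorites (pvG seats r' c') (pvG seats (r' + 1) c') = true then 1 else 0)
          else 0)).sum
        + ((PySem.List.pyRange 0 N 1).map (fun c' => if r' = r ∧ c' = c - 1 then
            (if c' + 1 < N ∧ pvLk favorites (pvG seats r' (c' + 1)) (pvG seats r' c') = true then 1 else 0)
          else 0)).sum
        + ((PySem.List.pyRange 0 N 1).map (fun c' => if r' = r - 1 ∧ c' = c then
            (if r' + 1 < N ∧ pvLk favorites (pvG seats (r' + 1) c') (pvG seats r' c') = true then 1 else 0)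
          else 0)).sum := by
    funext r'
    rw [count_flatMap_int]
    rw [show (fun c' : Int => (((edgeHits N seats favorites r' c').count (r, c) : Nat) : Int))
        = fun c' : Int =>
          (if r' = r ∧ c' = c then
            (if c' + 1 < N ∧ pvLk favorites (pvG seats r' c') (pvG seats r' (c' + 1)) = true then 1 else 0)
          + (if r' + 1 < N ∧ pvLk favorites (pvG seats r' c') (pvG seats (r' + 1) c') = true then 1 else 0)
           else 0)
          + (if r' = r ∧ c' = c - 1 then
            (if c' + 1 < N ∧ pvLk favorites (pvG seats r' (c' + 1)) (pvG seats r' c') = true then 1 else 0)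
           else 0)
          + (if r' = r - 1 ∧ c' = c then
            (if r' + 1 < N ∧ pvLk favorites (pvG seats (r' + 1) c') (pvG seats r' c') = true then 1 else 0)
           else 0)
      from funext fun c' => count_edgeHits N seats favorites r c r' c']
    rw [PySem.List.sum_map_add_int, PySem.List.sum_map_add_int]
  rw [hin]
  rw [PySem.List.sum_map_add_int, PySem.List.sum_map_add_int]
  rw [pt_sum _ (PySem.List.nodup_pyRange_one 0 N) r c _,
    pt_sum _ (PySem.List.nodup_pyRange_one 0 N) r (c - 1) _,
    pt_sum _ (PySem.List.nodup_pyRange_one 0 N) (r - 1) c _]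
  simp only [PySem.List.mem_pyRange_one, sub_add_cancel, cellCnt]
  by_cases m1 : pvLk favorites (pvG seats r c) (pvG seats r (c + 1)) = true <;>
    by_cases m2 : pvLk favorites (pvG seats r c) (pvG seats (r + 1) c) = true <;>
    by_cases m3 : pvLk favorites (pvG seats r c) (pvG seats r (c - 1)) = true <;>
    by_cases m4 : pvLk favorites (pvG seats r c) (pvG seats (r - 1) c) = true <;>
    simp [m1, m2, m3, m4] <;>
    split_ifs <;> omega

lemma B_eq_sum (N : Int) (seats : List (List Int)) (favorites : List (Int × List Int)) :
    calculateSatisfaction_alt N seats favorites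
      = ((PySem.List.pyRange 0 N 1).map (fun r =>
          ((PySem.List.pyRange 0 N 1).map (fun c => scoreA (cellCnt N seats favorites r c))).sum)).sum := by
  have hfl : (PySem.List.pyRange 0 N 1).foldl (fun acc r =>
        (PySem.List.pyRange 0 N 1).foldl (fun acc c => acc ++ edgeHits N seats favorites r c) acc)
        ([] : List (Int × Int))
      = (PySem.List.pyRange 0 N 1).flatMap (fun r' =>
          (PySem.List.pyRange 0 N 1).flatMap (fun c' => edgeHits N seats favorites r' c')) := by
    rw [PySem.List.foldl_congr_mem (PySem.List.pyRange 0 N 1) _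
      (fun acc r => acc ++ (PySem.List.pyRange 0 N 1).flatMap (fun c => edgeHits N seats favorites r c)) []
      (fun acc x _ => PySem.List.foldl_append_eq_flatMap _ _ _),
      PySem.List.foldl_append_eq_flatMap]
    simp
  refine Eq.trans (foldl2_eq_sum (PySem.List.pyRange 0 N 1) _ _ (fun tot r c => rfl)) ?_
  refine congrArg List.sum (List.map_congr_left fun r hr => ?_)
  refine congrArg List.sum (List.map_congr_left fun c hc => ?_)
  obtain ⟨hr0, hrN⟩ := PySem.List.mem_pyRange_one.mp hr
  obtain ⟨hc0, hcN⟩ := PySem.List.mem_pyRange_one.mp hc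
  rw [hfl, PySem.Dict.getD_foldl_insert_add_one]
  rw [show (PySem.Dict.empty : PySem.Dict (Int × Int) Int).getD (r, c) 0 = 0 from rfl, zero_add]
  rw [count_hits_eq N seats favorites r c hr0 hrN hc0 hcN]
  exact score_eq _ (cellCnt_bounds N seats favorites r c).1 (cellCnt_bounds N seats favorites r c).2

-- ===== VERDICT (by name: the statement is the Claim_ definition above) =====
theorem calculateSatisfaction_spec : Claim_equal_calculateSatisfaction := by
  intro N seats favorites _ _
  unfold Spec_calculateSatisfaction
  rw [A_eq_sum, B_eq_sum]
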